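-- pv_equiv track=rewrite | github.com/nikisundefined/SYSC3101_CourseWork | Lab 1/Lab 1 Files/lab1.py | count_in_list
-- ===== SOURCE A (Python) =====
-- def count_in_list(my_list, n, target):
--     """Return the count of the number of times target occurs in the first
--     n elements of list my_list."""
--     # your code goes here
--     if n == len(my_list):
--         n -= 1
--     increment = 0
--     if my_list[n] == target:
--         increment = 1
--     if n == 0:
--         return increment
--     return increment + count_in_list(my_list, n-1, target)
-- ===== SOURCE B (Python) =====
-- def count_in_list(my_list, n, target):
--     """Return the count of the number of times target occurs in the first
--     n elements of list my_list."""
--     m = n if n < len(my_list) else len(my_list) - 1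
--     return my_list[:m + 1].count(target)
-- ===== Notes on version B (the rewrite author's own statement) =====
-- stated objective: simpler
-- what changed: Replaces the element-by-element self-recursion (highest index first) with a single slice-and-count: clamp the end index once and return my_list[:m+1].count(target).
import Mathlib
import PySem

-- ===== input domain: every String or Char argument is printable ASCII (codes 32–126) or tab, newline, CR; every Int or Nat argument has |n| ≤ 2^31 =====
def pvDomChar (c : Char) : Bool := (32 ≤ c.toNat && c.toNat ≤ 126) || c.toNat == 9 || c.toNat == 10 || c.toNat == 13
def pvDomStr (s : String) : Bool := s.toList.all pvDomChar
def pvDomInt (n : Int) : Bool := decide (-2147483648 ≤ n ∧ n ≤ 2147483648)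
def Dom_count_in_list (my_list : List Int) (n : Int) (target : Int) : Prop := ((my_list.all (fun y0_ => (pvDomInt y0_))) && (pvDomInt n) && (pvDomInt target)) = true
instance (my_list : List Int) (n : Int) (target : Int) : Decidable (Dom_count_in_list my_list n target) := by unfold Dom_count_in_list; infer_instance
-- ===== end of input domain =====

-- B replaces A's element-by-element self-recursion with a single slice-and-count; objective: simpler.

-- ===== PORT A =====
-- Literal transliteration of A: clamp n when it equals len, test my_list[n],
-- recurse on n-1 until n = 0. Where Python raises IndexError (pyGet? = none)
-- the port returns 0; those inputs are excluded by Pre_count_in_list.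
def count_in_list (my_list : List Int) (n : Int) (target : Int) : Int :=
  let m := if n = (my_list.length : Int) then n - 1 else n
  match h : PySem.List.pyGet? my_list m with
  | none => 0
  | some v =>
    let increment : Int := if v = target then 1 else 0
    if m = 0 then increment
    else increment + count_in_list my_list (m - 1) target
termination_by (n + my_list.length + 1).toNat
decreasing_by
  have hin : PySem.Raise.InRange my_list.length m := by
    by_contra hc
    rw [← PySem.List.pyGet?_eq_none_iff] at hc
    simp [hc] at h
  have hb : -(my_list.length : Int) ≤ m ∧ m < my_list.length := by
    simpa [PySem.Raise.InRange] using hin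
  have hm : m ≤ n := by
    simp only [m]
    split <;> omega
  omega

-- ===== PORT B =====
-- Literal transliteration of Source B: m = n if n < len(my_list) else len(my_list)-1;
-- return my_list[:m+1].count(target).
def count_in_list_alt (my_list : List Int) (n : Int) (target : Int) : Int :=
  let m : Int := if n < (my_list.length : Int) then n else (my_list.length : Int) - 1
  PySem.List.count (PySem.List.slice my_list none (some (m + 1))) target

-- ===== PRECONDITION & SPEC =====
-- Pre_ excludes exactly the inputs where A raises IndexError: the empty list,
-- negative n (repeated decrement runs off the front) and n > len(my_list).
def Pre_count_in_list (my_list : List Int) (n : Int) (target : Int) : Prop :=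
  my_list ≠ [] ∧ 0 ≤ n ∧ n ≤ (my_list.length : Int)
instance (my_list : List Int) (n : Int) (target : Int) : Decidable (Pre_count_in_list my_list n target) := by unfold Pre_count_in_list; infer_instance
def pvWitness_count_in_list : List Int × Int × Int := ([1, 2, 1], 2, 1)

def Spec_count_in_list (my_list : List Int) (n : Int) (target : Int) (out : Int) : Prop := out = count_in_list_alt my_list n target
instance (my_list : List Int) (n : Int) (target : Int) (out : Int) : Decidable (Spec_count_in_list my_list n target out) := by unfold Spec_count_in_list; infer_instance

-- ===== CLAIM (what is proved, stated in full; the proofs are below) =====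
def Claim_equal_count_in_list : Prop := ∀ (my_list : List Int) (n : Int) (target : Int), Dom_count_in_list my_list n target → Pre_count_in_list my_list n target → Spec_count_in_list my_list n target (count_in_list my_list n target)

-- ===== LEMMAS AND PROOFS =====

-- A at an in-range Nat index k counts target in the first k+1 elements.
theorem count_in_list_take (my_list : List Int) (target : Int) :
    ∀ k : Nat, k < my_list.length →
      count_in_list my_list (k : Int) target
        = ((my_list.take (k + 1)).count target : Int) := by
  intro k
  induction k with
  | zero =>
    intro hk
    rw [count_in_list]
    have hne : (0 : Int) ≠ (my_list.length : Int) := by omega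
    have hget : PySem.List.pyGet? my_list ((0 : Nat) : Int) = some my_list[0] :=
      PySem.List.pyGet?_ofNat my_list _ hk
    simp only [Int.natCast_zero] at hget ⊢
    simp only [hne, if_false]
    rcases my_list with _ | ⟨x, xs⟩
    · simp at hk
    · simp [List.count_cons]
      split <;> simp_all
  | succ k ih =>
    intro hk
    rw [count_in_list]
    have hne : ((k + 1 : Nat) : Int) ≠ (my_list.length : Int) := by omega
    have hget : PySem.List.pyGet? my_list ((k + 1 : Nat) : Int) = some my_list[k + 1] :=
      PySem.List.pyGet?_ofNat my_list _ hk
    have hnz : ((k + 1 : Nat) : Int) ≠ 0 := by omega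
    simp only [hne, if_false, hnz]
    have hcast : ((k + 1 : Nat) : Int) - 1 = (k : Int) := by omega
    rw [hcast, ih (by omega)]
    have htake : my_list.take (k + 1 + 1) = my_list.take (k + 1) ++ [my_list[k + 1]] := by
      rw [List.take_add_one]
      simp [List.getElem?_eq_getElem hk]
    rw [htake, List.count_append]
    simp [List.count_singleton]
    split <;> simp_all <;> ring

-- At n = len(my_list) A's clamp makes the call identical to n = len - 1.
theorem clamp_step (my_list : List Int) (target : Int) (hne : my_list ≠ []) :
    count_in_list my_list (my_list.length : Int) target
      = count_in_list my_list ((my_list.length : Int) - 1) target := by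
  have hlen : 0 < my_list.length := List.length_pos_iff.mpr hne
  have h2 : (my_list.length : Int) - 1 ≠ (my_list.length : Int) := by omega
  conv_lhs => rw [count_in_list]
  rw [if_pos (rfl : (my_list.length : Int) = (my_list.length : Int))]
  conv_rhs => rw [count_in_list]
  rw [if_neg h2]

theorem count_in_list_spec_aux (my_list : List Int) (n target : Int)
    (hpre : Pre_count_in_list my_list n target) :
    count_in_list my_list n target = count_in_list_alt my_list n target := by
  obtain ⟨hne, hn0, hnlen⟩ := hpre
  have hlen : 0 < my_list.length := List.length_pos_iff.mpr hne
  by_cases hlt : n < (my_list.length : Int)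
  · -- n < len: no clamping on either side
    obtain ⟨k, rfl⟩ : ∃ k : Nat, n = (k : Int) := ⟨n.toNat, by omega⟩
    have hk : k < my_list.length := by omega
    rw [count_in_list_take my_list target k hk]
    unfold count_in_list_alt
    simp only [hlt, if_true]
    rw [show ((k : Int) + 1) = ((k + 1 : Nat) : Int) by omega,
        PySem.List.slice_to_natCast, PySem.List.count_eq]
  · -- n = len: A clamps to len - 1, B's m is len - 1
    have hn : n = (my_list.length : Int) := by omega
    subst hn
    rw [clamp_step my_list target hne]
    have hcast : (my_list.length : Int) - 1 = ((my_list.length - 1 : Nat) : Int) := by omega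
    have hk : my_list.length - 1 < my_list.length := by omega
    rw [hcast, count_in_list_take my_list target _ hk]
    unfold count_in_list_alt
    simp only [lt_irrefl, if_false]
    rw [show ((my_list.length : Int) - 1 + 1) = ((my_list.length : Nat) : Int) by omega,
        PySem.List.slice_to_natCast, PySem.List.count_eq]
    simp [show my_list.length - 1 + 1 = my_list.length by omega]

-- ===== VERDICT (by name: the statement is the Claim_ definition above) =====
theorem count_in_list_spec : Claim_equal_count_in_list := by
  intro my_list n target _ hpre
  unfold Spec_count_in_list
  exact count_in_list_spec_aux my_list n target hpre
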